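-- pv_equiv track=rewrite | github.com/morgoth1145/advent-of-code | 2021/17/solution.py | y_vel_solutions
-- ===== SOURCE A (Python) =====
-- def sum_range(first, last):
--     n = abs(first - last) + 1
--     return n * (first + last) // 2
--
-- def y_vel_solutions(yrange):
--     solutions = []
--
--     min_steps = 1
--     max_steps = 0
--
--     for base_yv in range(yrange[0], abs(yrange[0])):
--         y = sum_range(base_yv, base_yv-min_steps+1)
--         yv = base_yv - min_steps
--         step = min_steps
--
--         while y > yrange[-1]:
--             y, yv, step = y+yv, yv-1, step+1
--             min_steps += 1
--
--         if y < yrange[0]: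
--             continue
--
--         step = min_steps
--
--         if max_steps > step:
--             jump_steps = max_steps - step
--             step = max_steps
--             y += sum_range(yv, yv - jump_steps + 1)
--             yv -= jump_steps
--         else:
--             max_steps = step
--
--         max_steps = step
--         while y >= yrange[0]:
--             max_steps = step
--             y, yv, step = y+yv, yv-1, step+1
--
--         solutions.append((base_yv, min_steps, max_steps))
--
--     return solutions
-- ===== SOURCE B (Python) =====
-- def y_vel_solutions(yrange):
--     lo, hi = yrange[0], yrange[-1]
--
--     def pos(v, s):
--         # height after s steps starting with velocity v (closed form)
--         return s * v - s * (s - 1) // 2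
--
--     def first_true(f, a, b):
--         # least s in [a, b] with f(s), assuming f monotone (false..false,true..true) and f(b)
--         while a < b:
--             m = (a + b) // 2
--             if f(m):
--                 b = m
--             else:
--                 a = m + 1
--         return a
--
--     solutions = []
--     for v in range(lo, abs(lo)):
--         descent = v + 1 if v >= 0 else 1
--         bound = 2 * max(v, 0) + 2 + max(0, -lo) + max(0, -hi)
--         e = 1 if v <= hi else first_true(lambda s: pos(v, s) <= hi, descent, bound)
--         if pos(v, e) < lo:
--             continue
--         l = first_true(lambda s: pos(v, s) < lo, descent, bound) - 1
--         solutions.append((v, e, l))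
--     return solutions
-- ===== Notes on version B (the rewrite author's own statement) =====
-- stated objective: alternative
-- what changed: B drops A's carried monotone min_steps/max_steps state and all step-by-step simulation: for each velocity it evaluates the closed-form position polynomial and finds the entry step (first position at or below the upper bound) and exit step (last position at or above the lower bound) by binary search between closed bounds.
import Mathlib
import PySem

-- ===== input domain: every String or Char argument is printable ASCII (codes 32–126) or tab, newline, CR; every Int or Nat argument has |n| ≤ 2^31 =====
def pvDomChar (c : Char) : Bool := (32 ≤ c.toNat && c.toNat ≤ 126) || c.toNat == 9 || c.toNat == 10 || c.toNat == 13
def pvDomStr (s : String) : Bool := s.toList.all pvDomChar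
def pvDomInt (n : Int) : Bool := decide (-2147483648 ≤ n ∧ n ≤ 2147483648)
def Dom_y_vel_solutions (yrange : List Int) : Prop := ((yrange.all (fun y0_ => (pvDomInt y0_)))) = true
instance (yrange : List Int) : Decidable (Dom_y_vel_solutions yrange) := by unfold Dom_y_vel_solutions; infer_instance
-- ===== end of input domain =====

-- B replaces A's carried monotone min_steps/max_steps state and its step-by-step loops by
-- per-velocity binary searches on the closed-form position polynomial (alternative, not faster).

-- Termination-measure helpers (used only by the decreasing_by clauses of the loop ports).
def pvTri (n : Int) : Int := n * (n + 1) / 2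

theorem pvTri_two (n : Int) : 2 * pvTri n = n * (n + 1) := by
  obtain ⟨k, hk⟩ := Int.even_mul_succ_self n
  unfold pvTri
  rw [hk, show k + k = 2 * k by ring, Int.mul_ediv_cancel_left k (by norm_num)]

theorem pvTri_nonneg (n : Int) : 0 ≤ pvTri n := by
  have h := pvTri_two n
  rcases (by omega : 0 ≤ n ∨ n ≤ -1) with h1 | h1
  · nlinarith
  · nlinarith

theorem pvTri_succ (n : Int) : pvTri (n + 1) = pvTri n + (n + 1) := by
  have h1 := pvTri_two (n + 1)
  have h2 := pvTri_two n
  nlinarith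

theorem pvMeas_dec (c y yv : Int) (h : c < y) :
    (y + yv - c + pvTri (yv - 1 + 1)).toNat < (y - c + pvTri (yv + 1)).toNat := by
  have h1 := pvTri_succ yv
  have h2 := pvTri_nonneg yv
  have h4 := pvTri_nonneg (yv + 1)
  have h3 : yv - 1 + 1 = yv := by ring
  rw [h3]
  omega

theorem pvMeas_dec' (c y yv : Int) (h : c ≤ y) :
    (y + yv - c + 1 + pvTri (yv - 1 + 1)).toNat < (y - c + 1 + pvTri (yv + 1)).toNat := by
  have h1 := pvTri_succ yv
  have h2 := pvTri_nonneg yv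
  have h4 := pvTri_nonneg (yv + 1)
  have h3 : yv - 1 + 1 = yv := by ring
  rw [h3]
  omega

-- ===== PORT A =====
def pySumRange (first last : Int) : Int :=
  let n : Int := |first - last| + 1
  PySem.Int.floordiv (n * (first + last)) 2

def aWhile1 (hi y yv step minSteps : Int) : Int × Int × Int × Int :=
  if hi < y then aWhile1 hi (y + yv) (yv - 1) (step + 1) (minSteps + 1)
  else (y, yv, step, minSteps)
termination_by (y - hi + pvTri (yv + 1)).toNat
decreasing_by exact pvMeas_dec hi y yv (by assumption)

def aWhile2 (lo y yv step maxSteps : Int) : Int :=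
  if lo ≤ y then aWhile2 lo (y + yv) (yv - 1) (step + 1) step
  else maxSteps
termination_by (y - lo + 1 + pvTri (yv + 1)).toNat
decreasing_by exact pvMeas_dec' lo y yv (by assumption)

def aStep (lo hi : Int) (st : List (Int × Int × Int) × Int × Int) (v : Int) :
    List (Int × Int × Int) × Int × Int :=
  let sols := st.1
  let m := st.2.1
  let M := st.2.2
  let y0 := pySumRange v (v - m + 1)
  let r := aWhile1 hi y0 (v - m) m m
  let y := r.1
  let yv := r.2.1
  let m' := r.2.2.2
  if y < lo then (sols, m', M)
  else
    let step := m'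
    let t := if M > step then (y + pySumRange yv (yv - (M - step) + 1), yv - (M - step), M)
             else (y, yv, step)
    let maxF := aWhile2 lo t.1 t.2.1 t.2.2 t.2.2
    (sols ++ [(v, m', maxF)], m', maxF)

def y_vel_solutions (yrange : List Int) : List (Int × Int × Int) :=
  match PySem.List.pyGet? yrange 0, PySem.List.pyGet? yrange (-1) with
  | some lo, some hi => ((PySem.List.pyRange lo |lo| 1).foldl (aStep lo hi) ([], 1, 0)).1
  | _, _ => []   -- yrange = []: IndexError in Python, excluded by Pre_

-- ===== PORT B =====
def bPosFn (v s : Int) : Int := s * v - PySem.Int.floordiv (s * (s - 1)) 2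

def bFirstTrue (f : Int → Bool) (a b : Int) : Int :=
  if a < b then
    let m := PySem.Int.floordiv (a + b) 2
    if f m then bFirstTrue f a m else bFirstTrue f (m + 1) b
  else a
termination_by (b - a).toNat
decreasing_by
  · rw [PySem.Int.floordiv_eq_ediv_of_pos (by norm_num)]
    omega
  · rw [PySem.Int.floordiv_eq_ediv_of_pos (by norm_num)]
    omega

def bSolve (lo hi v : Int) : Option (Int × Int) :=
  let descent := if v ≥ 0 then v + 1 else 1
  let bound := 2 * max v 0 + 2 + max 0 (-lo) + max 0 (-hi)
  let e := if v ≤ hi then 1 else bFirstTrue (fun s => decide (bPosFn v s ≤ hi)) descent bound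
  if bPosFn v e < lo then none
  else some (e, bFirstTrue (fun s => decide (bPosFn v s < lo)) descent bound - 1)

def bStep (lo hi : Int) (sols : List (Int × Int × Int)) (v : Int) : List (Int × Int × Int) :=
  match bSolve lo hi v with
  | some (f, l) => sols ++ [(v, f, l)]
  | none => sols

def y_vel_solutions_alt (yrange : List Int) : List (Int × Int × Int) :=
  match PySem.List.pyGet? yrange 0 with
  | none => []   -- yrange = []: IndexError in Python, excluded by Pre_
  | some lo =>
    match PySem.List.pyGet? yrange (-1) with
    | none => []
    | some hi => (PySem.List.pyRange lo |lo| 1).foldl (bStep lo hi) []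

-- ===== PRECONDITION & SPEC =====
-- Pre_ excludes only the empty list, on which Python A raises IndexError (yrange[0]).
def Pre_y_vel_solutions (yrange : List Int) : Prop := yrange ≠ []
instance (yrange : List Int) : Decidable (Pre_y_vel_solutions yrange) := by
  unfold Pre_y_vel_solutions; infer_instance

def pvWitness_y_vel_solutions : List Int := [-5, -1]

def Spec_y_vel_solutions (yrange : List Int) (out : List (Int × Int × Int)) : Prop := out = y_vel_solutions_alt yrange
instance (yrange : List Int) (out : List (Int × Int × Int)) : Decidable (Spec_y_vel_solutions yrange out) := by unfold Spec_y_vel_solutions; infer_instance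

-- ===== CLAIM (what is proved, stated in full; the proofs are below) =====
def Claim_equal_y_vel_solutions : Prop := ∀ (yrange : List Int), Dom_y_vel_solutions yrange → Pre_y_vel_solutions yrange → Spec_y_vel_solutions yrange (y_vel_solutions yrange)

-- ===== LEMMAS AND PROOFS =====

-- Position after s steps starting with velocity v at height 0.
def pvPos (v : Int) : Nat → Int
  | 0 => 0
  | s + 1 => pvPos v s + (v - s)

theorem pvPos_succ (v : Int) (s : Nat) : pvPos v (s + 1) = pvPos v s + (v - s) := rfl

theorem pvPos_add (v : Int) (a b : Nat) :
    pvPos v (a + b) = pvPos v a + pvPos (v - a) b := by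
  induction b with
  | zero => simp [pvPos]
  | succ b ih =>
      have h1 : a + (b + 1) = (a + b) + 1 := by omega
      rw [h1, pvPos_succ, pvPos_succ, ih]
      push_cast
      ring

theorem pvPos_shift (a : Int) (j : Nat) : pvPos a (j + 1) = a + pvPos (a - 1) j := by
  have := pvPos_add a 1 j
  simpa [pvPos, Nat.add_comm] using this

theorem pvPos_two (v : Int) (s : Nat) : 2 * pvPos v s = s * (2 * v - s + 1) := by
  induction s with
  | zero => simp [pvPos]
  | succ s ih =>
      rw [pvPos_succ]
      push_cast
      push_cast at ih
      nlinarith [ih]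

theorem pvPos_mono (v w : Int) (h : v ≤ w) (s : Nat) : pvPos v s ≤ pvPos w s := by
  induction s with
  | zero => simp [pvPos]
  | succ s ih => rw [pvPos_succ, pvPos_succ]; omega

theorem pvPos_ascent (v : Int) (s : Nat) (h1 : 1 ≤ s) (h2 : (s : Int) ≤ v + 1) :
    v ≤ pvPos v s := by
  induction s with
  | zero => omega
  | succ s ih =>
      rcases Nat.eq_or_lt_of_le h1 with h | h
      · have hs0 : s = 0 := by omega
        subst hs0
        simp [pvPos]
      · have hs1 : 1 ≤ s := by omega
        have hs2 : (s : Int) ≤ v + 1 := by push_cast at h2 ⊢; omega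
        have := ih hs1 hs2
        rw [pvPos_succ]
        push_cast at h2
        omega

theorem pvPos_descent (v : Int) (a b : Nat) (hv : v ≤ (a : Int)) (hab : a ≤ b) :
    pvPos v b ≤ pvPos v a := by
  induction b, hab using Nat.le_induction with
  | base => exact le_rfl
  | succ b hb ih =>
      rw [pvPos_succ]
      have : v ≤ (b : Int) := by push_cast; omega
      omega

theorem pvPos_below (lo v : Int) (s : Nat) (hlo : lo < 0) (h : pvPos v s < lo) :
    pvPos v (s + 1) < lo := by
  by_cases hv : v ≤ (s : Int)
  · rw [pvPos_succ]; omega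
  · push_neg at hv
    rcases Nat.eq_zero_or_pos s with h0 | h0
    · subst h0; simp [pvPos] at h; omega
    · have := pvPos_ascent v s h0 (by omega)
      omega

theorem pvPos_below_ge (lo v : Int) (s t : Nat) (hlo : lo < 0) (h : pvPos v s < lo)
    (hst : s ≤ t) : pvPos v t < lo := by
  induction t, hst using Nat.le_induction with
  | base => exact h
  | succ t ht ih => exact pvPos_below lo v t hlo ih

theorem pySumRange_pos (a : Int) (j : Nat) (hj : 1 ≤ j) :
    pySumRange a (a - (j : Int) + 1) = pvPos a j := by
  show PySem.Int.floordiv ((|a - (a - (j : Int) + 1)| + 1) * (a + (a - (j : Int) + 1))) 2 = pvPos a j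
  have habs : |a - (a - (j : Int) + 1)| = (j : Int) - 1 := by
    rw [show a - (a - (j : Int) + 1) = (j : Int) - 1 by ring, abs_of_nonneg (by omega)]
  rw [habs]
  have h2 : ((j : Int) - 1 + 1) * (a + (a - (j : Int) + 1)) = 2 * pvPos a j := by
    rw [pvPos_two]; ring
  rw [h2, PySem.Int.floordiv_eq_ediv_of_pos (by norm_num),
      Int.mul_ediv_cancel_left _ (by norm_num)]

-- first while of A: advances while position > hi
theorem aWhile1_spec : ∀ (d : Nat) (hi y yv s m : Int), (y - hi + pvTri (yv + 1)).toNat ≤ d →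
    ∃ k : Nat, aWhile1 hi y yv s m = (y + pvPos yv k, yv - (k : Int), s + (k : Int), m + (k : Int)) ∧
      y + pvPos yv k ≤ hi ∧ ∀ j : Nat, j < k → hi < y + pvPos yv j := by
  intro d
  induction d with
  | zero =>
      intro hi y yv s m hd
      have hns : ¬ hi < y := by have := pvTri_nonneg (yv + 1); omega
      refine ⟨0, ?_, by simp [pvPos]; omega, by omega⟩
      rw [aWhile1.eq_def, if_neg hns]
      simp [pvPos]
  | succ d ih =>
      intro hi y yv s m hd
      by_cases h : hi < y
      · have hdec := pvMeas_dec hi y yv h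
        obtain ⟨k, hk, hle, hall⟩ := ih hi (y + yv) (yv - 1) (s + 1) (m + 1) (by omega)
        have h1 : pvPos yv (k + 1) = yv + pvPos (yv - 1) k := pvPos_shift yv k
        refine ⟨k + 1, ?_, by omega, ?_⟩
        · rw [aWhile1.eq_def, if_pos h, hk]
          simp only [Prod.mk.injEq]
          refine ⟨by omega, by push_cast; omega, by push_cast; omega, by push_cast; omega⟩
        · intro j hj
          match j with
          | 0 => simpa [pvPos] using h
          | j + 1 =>
              have := hall j (by omega)
              have h2 : pvPos yv (j + 1) = yv + pvPos (yv - 1) j := pvPos_shift yv j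
              omega
      · refine ⟨0, ?_, by simp [pvPos]; omega, by omega⟩
        rw [aWhile1.eq_def, if_neg h]
        simp [pvPos]

-- second while of A: advances while position ≥ lo, returns the last step seen
theorem aWhile2_spec : ∀ (d : Nat) (lo y yv s m : Int), (y - lo + 1 + pvTri (yv + 1)).toNat ≤ d →
    ∃ k : Nat, (∀ j : Nat, j < k → lo ≤ y + pvPos yv j) ∧ y + pvPos yv k < lo ∧
      aWhile2 lo y yv s m = if k = 0 then m else s + (k : Int) - 1 := by
  intro d
  induction d with
  | zero =>
      intro lo y yv s m hd
      have hns : ¬ lo ≤ y := by have := pvTri_nonneg (yv + 1); omega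
      refine ⟨0, by omega, by simp [pvPos]; omega, ?_⟩
      rw [aWhile2.eq_def, if_neg hns]
      simp
  | succ d ih =>
      intro lo y yv s m hd
      by_cases h : lo ≤ y
      · have hdec := pvMeas_dec' lo y yv h
        obtain ⟨k, hall, hlt, hk⟩ := ih lo (y + yv) (yv - 1) (s + 1) s (by omega)
        have h1 : pvPos yv (k + 1) = yv + pvPos (yv - 1) k := pvPos_shift yv k
        refine ⟨k + 1, ?_, by omega, ?_⟩
        · intro j hj
          match j with
          | 0 => simpa [pvPos] using h
          | j + 1 =>
              have := hall j (by omega)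
              have h2 : pvPos yv (j + 1) = yv + pvPos (yv - 1) j := pvPos_shift yv j
              omega
        · rw [aWhile2.eq_def, if_pos h, hk]
          by_cases hk0 : k = 0
          · subst hk0
            rw [if_pos rfl, if_neg (by omega)]
            push_cast; ring
          · rw [if_neg hk0, if_neg (by omega)]
            push_cast; ring
      · refine ⟨0, by omega, by simp [pvPos]; omega, ?_⟩
        rw [aWhile2.eq_def, if_neg h]
        simp

-- closed-form position and binary-search lemmas for B
theorem bPosFn_eq (v s : Int) (hs : 0 ≤ s) : bPosFn v s = pvPos v s.toNat := by
  have h2 := pvPos_two v s.toNat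
  obtain ⟨k, hk⟩ := Int.even_mul_pred_self s
  unfold bPosFn
  rw [PySem.Int.floordiv_eq_ediv_of_pos (by norm_num), hk, show k + k = 2 * k by ring,
      Int.mul_ediv_cancel_left k (by norm_num)]
  have hcast : ((s.toNat : Int)) = s := Int.toNat_of_nonneg hs
  rw [hcast] at h2
  have hexp : s * (2 * v - s + 1) = 2 * (s * v) - s * (s - 1) := by ring
  omega

theorem bFirstTrue_spec : ∀ (d : Nat) (f : Int → Bool) (a b : Int), (b - a).toNat ≤ d →
    a ≤ b → f b = true → (∀ s t : Int, a ≤ s → s ≤ t → f s = true → f t = true) →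
    a ≤ bFirstTrue f a b ∧ bFirstTrue f a b ≤ b ∧ f (bFirstTrue f a b) = true ∧
      ∀ s : Int, a ≤ s → s < bFirstTrue f a b → f s = false := by
  intro d
  induction d with
  | zero =>
      intro f a b h1 h2 h3 _
      have hab : a = b := by omega
      subst hab
      rw [bFirstTrue.eq_def, if_neg (by omega)]
      exact ⟨le_rfl, le_rfl, h3, fun s hs1 hs2 => absurd hs2 (by omega)⟩
  | succ d ih =>
      intro f a b h1 h2 h3 hm
      by_cases hab : a < b
      · rw [bFirstTrue.eq_def, if_pos hab]
        have hfd : PySem.Int.floordiv (a + b) 2 = (a + b) / 2 :=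
          PySem.Int.floordiv_eq_ediv_of_pos (by norm_num)
        simp only [hfd]
        have hm1 : a ≤ (a + b) / 2 ∧ (a + b) / 2 < b := by omega
        by_cases hfm : f ((a + b) / 2) = true
        · rw [if_pos hfm]
          obtain ⟨r1, r2, r3, r4⟩ := ih f a ((a + b) / 2) (by omega) (by omega) hfm
            (fun s t hs ht hf => hm s t hs ht hf)
          exact ⟨r1, by omega, r3, r4⟩
        · rw [if_neg hfm]
          obtain ⟨r1, r2, r3, r4⟩ := ih f ((a + b) / 2 + 1) b (by omega) (by omega) h3
            (fun s t hs ht hf => hm s t (by omega) ht hf)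
          refine ⟨by omega, r2, r3, ?_⟩
          intro s hs1 hs2
          by_cases hs3 : (a + b) / 2 + 1 ≤ s
          · exact r4 s hs3 hs2
          · by_contra hcon
            have hft : f s = true := by
              cases hb : f s
              · exact absurd hb hcon
              · rfl
            exact hfm (hm s ((a + b) / 2) hs1 (by omega) hft)
      · have hab' : a = b := by omega
        subst hab'
        rw [bFirstTrue.eq_def, if_neg (by omega)]
        exact ⟨le_rfl, le_rfl, h3, fun s hs1 hs2 => absurd hs2 (by omega)⟩

theorem pvPos_le_neg (w : Int) (hw : w ≤ -1) (t : Nat) : pvPos w t ≤ -(t : Int) := by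
  induction t with
  | zero => simp [pvPos]
  | succ t ih =>
      rw [pvPos_succ]
      push_cast
      push_cast at ih
      omega

theorem pvPos_flight (v : Int) (hv : 0 ≤ v) : pvPos v (2 * v.toNat + 1) = 0 := by
  have h := pvPos_two v (2 * v.toNat + 1)
  have hc : ((2 * v.toNat + 1 : Nat) : Int) = 2 * v + 1 := by push_cast; omega
  rw [hc] at h
  have h0 : (2 * v + 1) * (2 * v - (2 * v + 1) + 1) = 0 := by ring
  omega

theorem pvPos_big (lo hi v : Int) (hlo : lo < 0) (hv : lo ≤ v) :
    bPosFn v (2 * max v 0 + 2 + max 0 (-lo) + max 0 (-hi)) < lo ∧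
    bPosFn v (2 * max v 0 + 2 + max 0 (-lo) + max 0 (-hi)) ≤ hi := by
  set S : Int := 2 * max v 0 + 2 + max 0 (-lo) + max 0 (-hi) with hS
  have hS0 : 0 ≤ S := by omega
  rw [bPosFn_eq v S hS0]
  by_cases hv0 : 0 ≤ v
  · have hsplit : S.toNat = (2 * v.toNat + 1) + (S.toNat - (2 * v.toNat + 1)) := by omega
    rw [hsplit, pvPos_add, pvPos_flight v hv0, zero_add]
    have harg : v - ((2 * v.toNat + 1 : Nat) : Int) = -(v + 1) := by push_cast; omega
    rw [harg]
    have hle := pvPos_le_neg (-(v + 1)) (by omega) (S.toNat - (2 * v.toNat + 1))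
    have hc : ((S.toNat - (2 * v.toNat + 1) : Nat) : Int) = S - (2 * v + 1) := by push_cast; omega
    rw [hc] at hle
    omega
  · have hle := pvPos_le_neg v (by omega) S.toNat
    have hc : ((S.toNat : Nat) : Int) = S := by omega
    rw [hc] at hle
    omega

-- invariant carried by A's fold state
def pvInv (lo hi v m M : Int) : Prop :=
  ∃ mN MN : Nat, m = (mN : Int) ∧ M = (MN : Int) ∧ 1 ≤ mN ∧
    (∀ j : Nat, 1 ≤ j → j < mN → hi < pvPos v j) ∧ (1 ≤ MN → lo ≤ pvPos v MN)

theorem pvBand (lo hi v : Int) (e kk : Nat) (hlo : lo < 0) (he1 : 1 ≤ e)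
    (heHi : pvPos v e ≤ hi) (heLo : lo ≤ pvPos v e) (hstop : pvPos v kk < lo)
    (hpre : ∀ j : Nat, j < kk → lo ≤ pvPos v j) (hek : e < kk) :
    pvPos v (kk - 1) ≤ hi := by
  set L := kk - 1 with hL
  have hLe : e ≤ L := by omega
  by_cases hve : v ≤ (e : Int)
  · exact le_trans (pvPos_descent v e L hve hLe) heHi
  · push_neg at hve
    have he1' : (1 : Int) ≤ (e : Int) := by exact_mod_cast he1
    have hv0 : 0 < v := by omega
    have hasc : v ≤ pvPos v e := pvPos_ascent v e he1 (by omega)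
    have hhi : v ≤ hi := le_trans hasc heHi
    by_contra hgt
    push_neg at hgt
    have hL1 : 1 ≤ L := by omega
    have h2L := pvPos_two v L
    have hposL : 0 < pvPos v L := by omega
    have hfac : 0 < 2 * v - (L : Int) + 1 := by
      by_contra hf
      push_neg at hf
      have : (L : Int) * (2 * v - (L : Int) + 1) ≤ 0 :=
        mul_nonpos_of_nonneg_of_nonpos (by positivity) hf
      omega
    have hstep : pvPos v (L + 1) = pvPos v L + (v - (L : Int)) := pvPos_succ v L
    have hkL : kk = L + 1 := by omega
    rw [hkL] at hstop
    omega

theorem pvStep_eq (lo hi v m M : Int) (sols : List (Int × Int × Int))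
    (hlo : lo < 0) (hv : lo ≤ v) (hInv : pvInv lo hi v m M) :
    (aStep lo hi (sols, m, M) v).1 = bStep lo hi sols v ∧
      pvInv lo hi (v + 1) (aStep lo hi (sols, m, M) v).2.1 (aStep lo hi (sols, m, M) v).2.2 := by
  obtain ⟨mN, MN, rfl, rfl, hm1, hmPre, hMlo⟩ := hInv
  have hy0 : pySumRange v (v - (mN : Int) + 1) = pvPos v mN := pySumRange_pos v mN hm1
  obtain ⟨k1, hk1, hE, hallE⟩ := aWhile1_spec _ hi (pvPos v mN) (v - (mN : Int)) mN mN le_rfl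
  have hconv : ∀ j : Nat, pvPos v mN + pvPos (v - (mN : Int)) j = pvPos v (mN + j) :=
    fun j => (pvPos_add v mN j).symm
  set e := mN + k1 with he
  have hr1 : pvPos v mN + pvPos (v - (mN : Int)) k1 = pvPos v e := hconv k1
  rw [hr1] at hE
  have hallE' : ∀ j : Nat, 1 ≤ j → j < e → hi < pvPos v j := by
    intro j h1 h2
    by_cases hj : j < mN
    · exact hmPre j h1 hj
    · have hj' : j = mN + (j - mN) := by omega
      have h3 := hallE (j - mN) (by omega)
      rw [hconv (j - mN)] at h3
      rw [hj']
      exact h3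
  have he1 : 1 ≤ e := by omega
  obtain ⟨kk, hkpre0, hkstop0, _⟩ := aWhile2_spec _ lo 0 v 0 0 le_rfl
  have hkstop : pvPos v kk < lo := by simpa using hkstop0
  have hkpre : ∀ j : Nat, j < kk → lo ≤ pvPos v j := by
    intro j hj
    have := hkpre0 j hj
    simpa using this
  have hkk1 : 1 ≤ kk := by
    rcases Nat.eq_zero_or_pos kk with h | h
    · rw [h] at hkstop; simp [pvPos] at hkstop; omega
    · exact h
  -- shared facts about B's binary searches
  have hbig := pvPos_big lo hi v hlo hv
  set S : Int := 2 * max v 0 + 2 + max 0 (-lo) + max 0 (-hi) with hS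
  set descent : Int := if v ≥ 0 then v + 1 else 1 with hdes
  have hdes1 : 1 ≤ descent := by rw [hdes]; split_ifs <;> omega
  have hdesS : descent ≤ S := by rw [hdes]; split_ifs <;> omega
  have hmono : ∀ (c : Int), ∀ s t : Int, descent ≤ s → s ≤ t →
      decide (bPosFn v s ≤ c) = true → decide (bPosFn v t ≤ c) = true := by
    intro c s t hs ht hf
    have hs0 : 0 ≤ s := by omega
    have ht0 : 0 ≤ t := by omega
    rw [bPosFn_eq v s hs0] at hf
    rw [bPosFn_eq v t ht0]
    simp only [decide_eq_true_eq] at hf ⊢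
    refine le_trans (pvPos_descent v s.toNat t.toNat ?_ (by omega)) hf
    rw [hdes] at hs
    by_cases hvv : v ≥ 0
    · rw [if_pos hvv] at hs; omega
    · rw [if_neg hvv] at hs; omega
  have hmono' : ∀ (c : Int), ∀ s t : Int, descent ≤ s → s ≤ t →
      decide (bPosFn v s < c) = true → decide (bPosFn v t < c) = true := by
    intro c s t hs ht hf
    have h1 := hmono (c - 1) s t hs ht
    simp only [decide_eq_true_eq] at h1 hf ⊢
    have := h1 (by omega)
    omega
  -- B's entry step equals A's
  have hBe : (if v ≤ hi then (1 : Int)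
      else bFirstTrue (fun s => decide (bPosFn v s ≤ hi)) descent S) = (e : Int) := by
    by_cases hvh : v ≤ hi
    · rw [if_pos hvh]
      by_contra hne
      have hegt : 2 ≤ e := by
        have h1 : ((e : Int)) ≠ 1 := fun h => hne h.symm
        omega
      have := hallE' 1 le_rfl (by omega)
      simp [pvPos] at this
      omega
    · rw [if_neg hvh]
      push_neg at hvh
      have heDes : descent ≤ (e : Int) := by
        rw [hdes]
        by_cases hvv : v ≥ 0
        · rw [if_pos hvv]
          by_contra hlt
          have hel : (e : Int) ≤ v := by omega
          have := pvPos_ascent v e he1 (by omega)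
          omega
        · rw [if_neg hvv]; omega
      obtain ⟨r1, r2, r3, r4⟩ := bFirstTrue_spec (S - descent).toNat
        (fun s => decide (bPosFn v s ≤ hi)) descent S le_rfl hdesS
        (by simp only [decide_eq_true_eq]; exact hbig.2) (hmono hi)
      set r := bFirstTrue (fun s => decide (bPosFn v s ≤ hi)) descent S with hr
      have hfe : decide (bPosFn v (e : Int) ≤ hi) = true := by
        rw [bPosFn_eq v e (by omega)]
        simpa using hE
      have hre : r ≤ (e : Int) := by
        by_contra hgt
        have := r4 (e : Int) heDes (by omega)
        rw [hfe] at this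
        exact absurd this (by simp)
      have her : (e : Int) ≤ r := by
        have hr0 : 1 ≤ r := by omega
        rw [bPosFn_eq v r (by omega)] at r3
        simp only [decide_eq_true_eq] at r3
        by_contra hgt
        have hrn : r.toNat < e := by omega
        have := hallE' r.toNat (by omega) hrn
        omega
      omega
  -- B's exit search equals A's stopping step
  have hBl : bFirstTrue (fun s => decide (bPosFn v s < lo)) descent S = (kk : Int) := by
    have hkDes : descent ≤ (kk : Int) := by
      rw [hdes]
      by_cases hvv : v ≥ 0
      · rw [if_pos hvv]
        by_contra hlt
        have hkl : (kk : Int) ≤ v := by omega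
        have := pvPos_ascent v kk hkk1 (by omega)
        omega
      · rw [if_neg hvv]; omega
    obtain ⟨r1, r2, r3, r4⟩ := bFirstTrue_spec (S - descent).toNat
      (fun s => decide (bPosFn v s < lo)) descent S le_rfl hdesS
      (by simp only [decide_eq_true_eq]; exact hbig.1) (hmono' lo)
    set r := bFirstTrue (fun s => decide (bPosFn v s < lo)) descent S with hr
    have hfk : decide (bPosFn v (kk : Int) < lo) = true := by
      rw [bPosFn_eq v kk (by omega)]
      simpa using hkstop
    have hrk : r ≤ (kk : Int) := by
      by_contra hgt
      have := r4 (kk : Int) hkDes (by omega)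
      rw [hfk] at this
      exact absurd this (by simp)
    have hkr : (kk : Int) ≤ r := by
      rw [bPosFn_eq v r (by omega)] at r3
      simp only [decide_eq_true_eq] at r3
      by_contra hgt
      have := hkpre r.toNat (by omega)
      omega
    omega
  have hcheck : bPosFn v (e : Int) = pvPos v e := by
    rw [bPosFn_eq v e (by omega)]
    simp
  -- A's step unfolded to the first-while result
  have hAr : aWhile1 hi (pySumRange v (v - (mN : Int) + 1)) (v - (mN : Int)) (mN : Int) (mN : Int) =
      (pvPos v e, v - (e : Int), (e : Int), (e : Int)) := by
    rw [hy0, hk1, hr1, he]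
    simp only [Prod.mk.injEq]
    push_cast
    refine ⟨by trivial, by ring, by ring, by ring⟩
  by_cases hskip : pvPos v e < lo
  · -- velocity overshoots the window in one step: A continues, B appends nothing
    have hBnone : bSolve lo hi v = none := by
      simp only [bSolve]
      rw [← hdes, ← hS, hBe, if_pos (by rw [hcheck]; exact hskip)]
    have hAeq : aStep lo hi (sols, (mN : Int), (MN : Int)) v = (sols, (e : Int), (MN : Int)) := by
      simp only [aStep, hAr]
      rw [if_pos hskip]
    rw [hAeq]
    refine ⟨by simp [bStep, hBnone], ?_⟩
    exact ⟨e, MN, rfl, rfl, he1,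
      fun j h1 h2 => lt_of_lt_of_le (hallE' j h1 h2) (pvPos_mono v (v + 1) (by omega) j),
      fun h => le_trans (hMlo h) (pvPos_mono v (v + 1) (by omega) MN)⟩
  · -- accepted velocity
    push_neg at hskip
    have hek : e < kk := by
      by_contra hge
      exact absurd (pvPos_below_ge lo v kk e hlo hkstop (by omega)) (by omega)
    have hband := pvBand lo hi v e kk hlo he1 hE hskip hkstop hkpre hek
    have hklo : lo ≤ pvPos v (kk - 1) := hkpre (kk - 1) (by omega)
    have hBsome : bSolve lo hi v = some ((e : Int), (kk : Int) - 1) := by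
      simp only [bSolve]
      rw [← hdes, ← hS, hBe, if_neg (by rw [hcheck]; omega), hBl]
    -- A's second while: starting point
    have hstart : ∀ sN2 : Nat, lo ≤ pvPos v sN2 →
        aWhile2 lo (pvPos v sN2) (v - (sN2 : Int)) (sN2 : Int) (sN2 : Int) = (kk : Int) - 1 := by
      intro sN2 hs2
      obtain ⟨k2, hall2, hlt2, hres2⟩ := aWhile2_spec _ lo (pvPos v sN2) (v - (sN2 : Int)) sN2 sN2 le_rfl
      have hconv2 : ∀ j : Nat, pvPos v sN2 + pvPos (v - (sN2 : Int)) j = pvPos v (sN2 + j) :=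
        fun j => (pvPos_add v sN2 j).symm
      rw [hconv2 k2] at hlt2
      have hk20 : k2 ≠ 0 := by
        intro h0
        subst h0
        simp at hlt2
        omega
      have hs2k : sN2 < kk := by
        by_contra hge
        exact absurd (pvPos_below_ge lo v kk sN2 hlo hkstop (by omega)) (by omega)
      have hsum : sN2 + k2 = kk := by
        rcases Nat.lt_trichotomy (sN2 + k2) kk with h | h | h
        · exact absurd (hkpre _ h) (by omega)
        · exact h
        · have h4 := hall2 (kk - sN2) (by omega)
          rw [hconv2 (kk - sN2)] at h4
          have h5 : sN2 + (kk - sN2) = kk := by omega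
          rw [h5] at h4
          omega
      rw [hres2, if_neg hk20]
      have : ((k2 : Int)) = (kk : Int) - (sN2 : Int) := by push_cast; omega
      omega
    have hstartE : lo ≤ pvPos v e := hskip
    have hAeq : aStep lo hi (sols, (mN : Int), (MN : Int)) v =
        (sols ++ [(v, (e : Int), (kk : Int) - 1)], (e : Int), (kk : Int) - 1) := by
      simp only [aStep, hAr]
      rw [if_neg (by omega)]
      by_cases hM : (MN : Int) > (e : Int)
      · rw [if_pos hM]
        have hMN1 : 1 ≤ MN := by omega
        have hjmp : (v - (e : Int)) - ((MN : Int) - (e : Int)) + 1 =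
            (v - (e : Int)) - ((MN - e : Nat) : Int) + 1 := by push_cast; omega
        have hsum2 : pvPos v e + pySumRange (v - (e : Int)) ((v - (e : Int)) - ((MN : Int) - (e : Int)) + 1) =
            pvPos v MN := by
          rw [hjmp, pySumRange_pos (v - (e : Int)) (MN - e) (by omega)]
          have := pvPos_add v e (MN - e)
          have h5 : e + (MN - e) = MN := by omega
          rw [h5] at this
          omega
        simp only
        rw [hsum2]
        have hyv2 : v - (e : Int) - ((MN : Int) - (e : Int)) = v - (MN : Int) := by ring
        rw [hyv2, hstart MN (hMlo hMN1)]
      · rw [if_neg hM]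
        simp only
        rw [hstart e hstartE]
    rw [hAeq]
    constructor
    · simp [bStep, hBsome]
    · refine ⟨e, kk - 1, rfl, by push_cast; omega, he1,
        fun j h1 h2 => lt_of_lt_of_le (hallE' j h1 h2) (pvPos_mono v (v + 1) (by omega) j),
        fun h => le_trans hklo (pvPos_mono v (v + 1) (by omega) (kk - 1))⟩

theorem pvFold_eq (lo hi b : Int) (hlo : lo < 0) :
    ∀ (n : Nat) (v m M : Int) (sols : List (Int × Int × Int)), (b - v).toNat ≤ n → lo ≤ v →
      pvInv lo hi v m M →
      ((PySem.List.pyRange v b 1).foldl (aStep lo hi) (sols, m, M)).1 =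
        (PySem.List.pyRange v b 1).foldl (bStep lo hi) sols := by
  intro n
  induction n with
  | zero =>
      intro v m M sols h1 _ _
      rw [PySem.List.pyRange_one_eq_nil (by omega)]
      rfl
  | succ n ih =>
      intro v m M sols h1 h2 h3
      by_cases hvb : v < b
      · rw [PySem.List.pyRange_one_cons hvb]
        simp only [List.foldl_cons]
        obtain ⟨hs1, hs2⟩ := pvStep_eq lo hi v m M sols hlo h2 h3
        have heta : aStep lo hi (sols, m, M) v =
            ((aStep lo hi (sols, m, M) v).1, (aStep lo hi (sols, m, M) v).2.1,
             (aStep lo hi (sols, m, M) v).2.2) := rfl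
        rw [heta, ih (v + 1) _ _ _ (by omega) (by omega) hs2, hs1]
      · rw [PySem.List.pyRange_one_eq_nil (by omega)]
        rfl

-- ===== VERDICT (by name: the statement is the Claim_ definition above) =====
theorem y_vel_solutions_spec : Claim_equal_y_vel_solutions := by
  intro yrange hdom hpre
  unfold Spec_y_vel_solutions
  match yrange, hpre with
  | z :: rest, _ =>
    have h0 : PySem.List.pyGet? (z :: rest) 0 = some z := by
      simp [PySem.List.pyGet?_zero_cons]
    have hl : PySem.List.pyGet? (z :: rest) (-1) = some ((z :: rest).getLast (by simp)) := by
      rw [PySem.List.pyGet?_neg_one, List.getLast?_eq_getLast]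
    simp only [y_vel_solutions, y_vel_solutions_alt, h0, hl]
    by_cases hneg : z < 0
    · exact pvFold_eq z _ |z| hneg ((|z| - z).toNat) z 1 0 [] (by omega) (by omega)
        ⟨1, 0, by norm_num, by norm_num, by omega, by omega, by omega⟩
    · rw [PySem.List.pyRange_one_eq_nil (by rw [abs_of_nonneg (by omega : (0:Int) ≤ z)])]
      rfl
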